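-- pv_equiv track=rewrite | github.com/Y-point/Geo-MOEA | Geo_MOEA/L-SRR/PO.py | find_prefix3
-- ===== SOURCE A (Python) =====
-- def find_prefix3(current_position, data):
-- 	prefix = 44
-- 	count_list=[]
-- 	dif_list=[]
-- 	pre_list=[]
-- 	while True:
-- 		count = 0
-- 		for other in data:
-- 			match_count = 0
-- 			for i in range(prefix):
-- 				if current_position[i] == other[i]:
-- 					match_count += 1
-- 				else:
-- 					break
--
-- 				if match_count >= prefix:
-- 					break
-- 			if match_count >= prefix:
-- 				count += 1
-- 		pre_list.append(prefix)
-- 		count_list.append(count)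
-- 		dif_list.append(abs(25-count))
-- 		if prefix<=2:
-- 			return pre_list[dif_list.index(min(dif_list))],count_list[dif_list.index(min(dif_list))]
-- 		prefix -= 2
-- ===== SOURCE B (Python) =====
-- def find_prefix3(current_position, data):
--     # Compute each entry's common-prefix length with current_position ONCE
--     # (capped at 44), instead of re-matching characters for every prefix.
--     def lcp(other):
--         L = 0
--         while L < 44 and current_position[L] == other[L]:
--             L += 1
--         return L
--
--     Ls = [lcp(other) for other in data]
--     best = None  # (prefix, count, |25 - count|), first strict improvement kept
--     for k in range(22):
--         p = 44 - 2 * k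
--         c = sum(1 for L in Ls if L >= p)
--         d = abs(25 - c)
--         if best is None or d < best[2]:
--             best = (p, c, d)
--     return best[0], best[1]
-- ===== Notes on version B (the rewrite author's own statement) =====
-- stated objective: faster
-- what changed: B computes each entry's common-prefix length with current_position once (a single indexed scan, capped at 44) and then derives the match-count for all 22 prefix lengths from those cached lengths with a streaming first-argmin, instead of A's re-matching characters entry by entry for every one of the 22 prefixes and selecting via three parallel lists and index(min) at the end.
import Mathlib
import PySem

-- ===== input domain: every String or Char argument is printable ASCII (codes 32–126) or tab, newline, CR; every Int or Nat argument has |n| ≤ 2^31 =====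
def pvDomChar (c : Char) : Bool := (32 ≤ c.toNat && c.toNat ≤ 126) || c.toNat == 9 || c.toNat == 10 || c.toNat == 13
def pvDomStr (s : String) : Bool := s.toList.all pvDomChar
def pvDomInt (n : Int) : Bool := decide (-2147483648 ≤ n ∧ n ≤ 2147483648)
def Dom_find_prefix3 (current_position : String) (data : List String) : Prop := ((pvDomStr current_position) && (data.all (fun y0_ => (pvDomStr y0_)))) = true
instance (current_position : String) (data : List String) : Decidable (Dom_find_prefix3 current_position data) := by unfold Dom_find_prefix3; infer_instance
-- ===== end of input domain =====

set_option maxHeartbeats 1000000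


-- B replaces A's per-prefix re-matching of characters by a single common-prefix-length
-- pass per entry plus a streaming first-argmin scan (objective: a different algorithm).
-- Both Pythons raise IndexError on the same inputs (an entry that keeps matching
-- current_position to the end of either string before 44 characters); Pre_ excludes
-- exactly those, and both ports break at the failed index access there.

-- ===== PORT A =====

-- inner 'for i in range(prefix)'; i is nonnegative so Python's xs[i] is xs[i]?
def pvInnerA (a b : List Char) (pre i mc : Nat) : Nat :=
  if i < pre then
    match a[i]?, b[i]? with
    | some x, some y =>
      if x = y then
        (if pre ≤ mc + 1 then mc + 1        -- 'if match_count >= prefix: break'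
         else pvInnerA a b pre (i + 1) (mc + 1))
      else mc                               -- 'else: break'
    | _, _ => mc                            -- Python raises IndexError here; the port breaks
  else mc
termination_by pre - i

-- 'count = 0; for other in data: ... if match_count >= prefix: count += 1'
def pvCountA (a : List Char) (data : List (List Char)) (pre : Nat) : Int :=
  data.foldl (fun c other => if pre ≤ pvInnerA a other pre 0 0 then c + 1 else c) 0

-- the 'while True' loop; state = (prefix, pre_list, count_list, dif_list)
def pvOuterA (a : List Char) (data : List (List Char)) (pre : Nat)
    (preL cntL difL : List Int) : List Int :=
  let count := pvCountA a data pre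
  let preL' := preL ++ [(pre : Int)]
  let cntL' := cntL ++ [count]
  let difL' := difL ++ [|25 - count|]
  if _h : pre ≤ 2 then
    let m := (PySem.List.min? difL' (fun x => x)).getD 0
    let i := (PySem.List.index? difL' m).getD 0
    [(preL'[i]?).getD 0, (cntL'[i]?).getD 0]
  else pvOuterA a data (pre - 2) preL' cntL' difL'
termination_by pre
decreasing_by omega

def find_prefix3 (current_position : String) (data : List String) : List Int :=
  pvOuterA current_position.toList (data.map String.toList) 44 [] [] []

-- ===== PORT B =====

-- Source B 'lcp': 'while L < 44 and current_position[L] == other[L]: L += 1'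
def pvLcpB (a b : List Char) (L : Nat) : Nat :=
  if L < 44 then
    match a[L]?, b[L]? with
    | some x, some y => if x = y then pvLcpB a b (L + 1) else L
    | _, _ => L        -- Python raises IndexError here; the port breaks (outside Pre_)
  else L
termination_by 44 - L

def find_prefix3_alt (current_position : String) (data : List String) : List Int :=
  let a := current_position.toList
  let Ls : List Int := data.map (fun other => (pvLcpB a other.toList 0 : Int))
  let best : Option ((Int × Int) × Int) := (List.range 22).foldl
    (fun best (k : Nat) =>
      let p : Int := 44 - 2 * (k : Int)
      let c : Int := Ls.foldl (fun s L => if p ≤ L then s + 1 else s) 0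
      let d : Int := |25 - c|
      match best with
      | none => some ((p, c), d)
      | some ((bp, bc), bd) => if d < bd then some ((p, c), d) else some ((bp, bc), bd))
    none
  match best with
  | some ((bp, bc), _) => [bp, bc]
  | none => [0, 0]   -- unreachable: range(22) is nonempty

-- ===== PRECONDITION & SPEC =====

-- Pre_ excludes exactly the inputs on which both Pythons raise IndexError: an entry
-- whose common prefix with current_position runs off the end of either string
-- before 44 characters.
def Pre_find_prefix3 (current_position : String) (data : List String) : Prop :=
  ∀ s ∈ data,
    44 ≤ min current_position.toList.length s.toList.length ∨
    ∃ i < min current_position.toList.length s.toList.length,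
      current_position.toList[i]? ≠ s.toList[i]?
instance (current_position : String) (data : List String) : Decidable (Pre_find_prefix3 current_position data) := by unfold Pre_find_prefix3; infer_instance

def pvWitness_find_prefix3 : String × List String := ("ab", ["b", "aa"])

def Spec_find_prefix3 (current_position : String) (data : List String) (out : List Int) : Prop := out = find_prefix3_alt current_position data
instance (current_position : String) (data : List String) (out : List Int) : Decidable (Spec_find_prefix3 current_position data out) := by unfold Spec_find_prefix3; infer_instance

-- ===== CLAIM (what is proved, stated in full; the proofs are below) =====
def Claim_equal_find_prefix3 : Prop := ∀ (current_position : String) (data : List String), Dom_find_prefix3 current_position data → Pre_find_prefix3 current_position data → Spec_find_prefix3 current_position data (find_prefix3 current_position data)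

-- ===== LEMMAS AND PROOFS =====

-- the (uncapped) common-prefix length of two character lists
def pvLcp : List Char → List Char → Nat
  | x :: xs, y :: ys => if x = y then pvLcp xs ys + 1 else 0
  | _, _ => 0

theorem pvInnerA_eq (a b : List Char) (p : Nat) :
    ∀ n i, p - i ≤ n → i ≤ p →
      pvInnerA a b p i i = min p (i + pvLcp (a.drop i) (b.drop i)) := by
  intro n
  induction n with
  | zero =>
    intro i h1 h2
    have hip : i = p := by omega
    subst hip
    rw [pvInnerA]
    rw [if_neg (by omega)]
    omega
  | succ n ih =>
    intro i h1 h2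
    by_cases hip : i < p
    · rw [pvInnerA]
      rw [if_pos hip]
      have hai : a[i]? = (a.drop i)[0]? := by rw [List.getElem?_drop]; norm_num
      have hbi : b[i]? = (b.drop i)[0]? := by rw [List.getElem?_drop]; norm_num
      rcases ha : a.drop i with _ | ⟨x, xs⟩ <;> rcases hb : b.drop i with _ | ⟨y, ys⟩ <;>
          rw [ha] at hai <;> rw [hb] at hbi <;> rw [hai, hbi] <;>
          simp only [List.getElem?_nil, List.getElem?_cons_zero]
      · simp [pvLcp]; omega
      · simp [pvLcp]; omega
      · simp [pvLcp]; omega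
      · by_cases hxy : x = y
        · rw [if_pos hxy]
          by_cases hpi : p ≤ i + 1
          · rw [if_pos hpi]
            simp [pvLcp, hxy]
            omega
          · rw [if_neg hpi]
            have hdr : a.drop (i+1) = xs := by rw [← List.tail_drop, ha]; rfl
            have hdr2 : b.drop (i+1) = ys := by rw [← List.tail_drop, hb]; rfl
            rw [ih (i+1) (by omega) (by omega), hdr, hdr2]
            simp [pvLcp, hxy]
            omega
        · rw [if_neg hxy]
          simp [pvLcp, hxy]
          omega
    · have hip2 : i = p := by omega
      subst hip2
      rw [pvInnerA]
      rw [if_neg (by omega)]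
      omega

theorem pvLcpB_eq (a b : List Char) :
    ∀ n L, 44 - L ≤ n → L ≤ 44 →
      pvLcpB a b L = min 44 (L + pvLcp (a.drop L) (b.drop L)) := by
  intro n
  induction n with
  | zero =>
    intro L h1 h2
    have : L = 44 := by omega
    subst this
    rw [pvLcpB, if_neg (by omega)]
    omega
  | succ n ih =>
    intro L h1 h2
    by_cases hL : L < 44
    · rw [pvLcpB, if_pos hL]
      have hai : a[L]? = (a.drop L)[0]? := by rw [List.getElem?_drop]; norm_num
      have hbi : b[L]? = (b.drop L)[0]? := by rw [List.getElem?_drop]; norm_num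
      rcases ha : a.drop L with _ | ⟨x, xs⟩ <;> rcases hb : b.drop L with _ | ⟨y, ys⟩ <;>
          rw [ha] at hai <;> rw [hb] at hbi <;> rw [hai, hbi] <;>
          simp only [List.getElem?_nil, List.getElem?_cons_zero]
      · simp [pvLcp]; omega
      · simp [pvLcp]; omega
      · simp [pvLcp]; omega
      · by_cases hxy : x = y
        · rw [if_pos hxy]
          have hdr : a.drop (L+1) = xs := by rw [← List.tail_drop, ha]; rfl
          have hdr2 : b.drop (L+1) = ys := by rw [← List.tail_drop, hb]; rfl
          rw [ih (L+1) (by omega) (by omega), hdr, hdr2]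
          simp [pvLcp, hxy]
          omega
        · rw [if_neg hxy]
          simp [pvLcp, hxy]
          omega
    · have : L = 44 := by omega
      subst this
      rw [pvLcpB, if_neg (by omega)]
      omega

-- first element (scanning left to right) whose key is strictly below the running best
def pvPick {α : Type} (key : α → Int) (b : α) : List α → α
  | [] => b
  | z :: zs => if key z < key b then pvPick key z zs else pvPick key b zs

theorem pvPick_le {α : Type} (key : α → Int) :
    ∀ (zs : List α) (b : α), key (pvPick key b zs) ≤ key b := by
  intro zs
  induction zs with
  | nil => intro b; simp [pvPick]
  | cons z zs ih =>
    intro b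
    rw [pvPick]
    split_ifs with h
    · exact le_of_lt (lt_of_le_of_lt (ih z) h)
    · exact ih b

theorem pvPick_eq_self {α : Type} (key : α → Int) :
    ∀ (zs : List α) (b : α), key (pvPick key b zs) = key b → pvPick key b zs = b := by
  intro zs
  induction zs with
  | nil => intro b _; rfl
  | cons z zs ih =>
    intro b h
    rw [pvPick] at h ⊢
    split_ifs at h ⊢ with hz
    · exact absurd (h ▸ hz) (by have := pvPick_le key zs z; omega)
    · exact ih b h

theorem pvPick_switch {α : Type} (key : α → Int) :
    ∀ (zs : List α) (b c : α), key b ≤ key c → key (pvPick key b zs) < key b →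
      pvPick key b zs = pvPick key c zs := by
  intro zs
  induction zs with
  | nil => intro b c _ h; simp [pvPick] at h
  | cons z zs ih =>
    intro b c hbc h
    rw [pvPick] at h ⊢
    conv_rhs => rw [pvPick]
    by_cases hzb : key z < key b
    · rw [if_pos hzb] at h ⊢
      rw [if_pos (lt_of_lt_of_le hzb hbc)]
    · rw [if_neg hzb] at h ⊢
      by_cases hzc : key z < key c
      · rw [if_pos hzc]
        exact ih b z (by omega) h
      · rw [if_neg hzc]
        exact ih b c hbc h

theorem pvPick_min {α : Type} (key : α → Int) :
    ∀ (zs : List α) (b : α), key (pvPick key b zs) = (zs.map key).foldl min (key b) := by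
  intro zs
  induction zs with
  | nil => intro b; rfl
  | cons z zs ih =>
    intro b
    rw [pvPick, List.map_cons, List.foldl_cons]
    split_ifs with h
    · rw [ih z]
      congr 1
      omega
    · rw [ih b]
      congr 1
      omega

theorem pvPick_index {α : Type} (key : α → Int) :
    ∀ (zs : List α) (b : α), ∃ i,
      PySem.List.index? ((b :: zs).map key) (key (pvPick key b zs)) = some i ∧
      (b :: zs)[i]? = some (pvPick key b zs) := by
  intro zs
  induction zs with
  | nil =>
    intro b
    exact ⟨0, by simp [pvPick], by simp [pvPick]⟩
  | cons z zs ih =>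
    intro b
    rw [pvPick]
    by_cases h : key z < key b
    · rw [if_pos h]
      have hlt : key (pvPick key z zs) < key b := lt_of_le_of_lt (pvPick_le key zs z) h
      obtain ⟨i, hidx, hget⟩ := ih z
      refine ⟨i + 1, ?_, ?_⟩
      · rw [List.map_cons, PySem.List.index?_cons_of_ne _ (by omega), hidx]
        rfl
      · simpa using hget
    · rw [if_neg h]
      by_cases heq : key (pvPick key b zs) = key b
      · have hb : pvPick key b zs = b := pvPick_eq_self key zs b heq
        refine ⟨0, ?_, by simp [hb]⟩
        rw [hb, List.map_cons, PySem.List.index?_cons_self]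
      · have hlt : key (pvPick key b zs) < key b :=
          lt_of_le_of_ne (pvPick_le key zs b) heq
        have hsw : pvPick key b zs = pvPick key z zs :=
          pvPick_switch key zs b z (by omega) hlt
        rw [hsw]
        have hlt2 : key (pvPick key z zs) < key b := hsw ▸ hlt
        obtain ⟨i, hidx, hget⟩ := ih z
        refine ⟨i + 1, ?_, ?_⟩
        · rw [List.map_cons, PySem.List.index?_cons_of_ne _ (by omega), hidx]
          rfl
        · simpa using hget

-- B's running-best step, abstracted over the key
def pvStep {α : Type} (key : α → Int) (best : Option (α × Int)) (z : α) : Option (α × Int) :=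
  match best with
  | none => some (z, key z)
  | some (bb, bd) => if key z < bd then some (z, key z) else some (bb, bd)

-- B's streaming fold computes pvPick
theorem pvFoldB {α : Type} (key : α → Int) :
    ∀ (zs : List α) (b : α),
      zs.foldl (pvStep key) (some (b, key b))
      = some (pvPick key b zs, key (pvPick key b zs)) := by
  intro zs
  induction zs with
  | nil => intro b; rfl
  | cons z zs ih =>
    intro b
    rw [List.foldl_cons, pvPick]
    have hst : pvStep key (some (b, key b)) z
        = if key z < key b then some (z, key z) else some (b, key b) := rfl
    rw [hst]
    split_ifs with h
    · exact ih z
    · exact ih b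

-- proof-side abbreviations: the k-th (prefix, count) pair both programs are about
def pvKey (z : Int × Int) : Int := |25 - z.2|

def pvZ (a : List Char) (d : List (List Char)) (k : Nat) : Int × Int :=
  (44 - 2 * (k : Int), pvCountA a d (44 - 2 * k))

def pvZs (a : List Char) (d : List (List Char)) (j : Nat) : List (Int × Int) :=
  (List.range j).map (pvZ a d)

-- A's final 'index of the minimum difference' selection, on the triple of parallel lists
def pvSel (zs : List (Int × Int)) : List Int :=
  [((zs.map Prod.fst)[(PySem.List.index? (zs.map pvKey) ((PySem.List.min? (zs.map pvKey) (fun x => x)).getD 0)).getD 0]?).getD 0,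
   ((zs.map Prod.snd)[(PySem.List.index? (zs.map pvKey) ((PySem.List.min? (zs.map pvKey) (fun x => x)).getD 0)).getD 0]?).getD 0]

theorem pvZs_succ (a : List Char) (d : List (List Char)) (j : Nat) :
    pvZs a d (j + 1) = pvZs a d j ++ [pvZ a d j] := by
  unfold pvZs
  rw [List.range_succ, List.map_append]
  rfl

-- A's while loop, started at step j with the first j rows accumulated, ends in pvSel of all 22 rows
theorem pvOuterA_run (a : List Char) (d : List (List Char)) :
    ∀ n j, j + n = 21 →
      pvOuterA a d (44 - 2 * j) ((pvZs a d j).map Prod.fst) ((pvZs a d j).map Prod.snd)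
        ((pvZs a d j).map pvKey) = pvSel (pvZs a d 22) := by
  intro n
  induction n with
  | zero =>
    intro j hj
    have : j = 21 := by omega
    subst this
    rw [pvOuterA]
    rw [dif_pos (show 44 - 2 * 21 ≤ 2 by omega)]
    have h1 : (pvZs a d 21).map Prod.fst ++ [((44 - 2 * 21 : Nat) : Int)] = (pvZs a d 22).map Prod.fst := by
      simp only [show (22 : Nat) = 21 + 1 from rfl, pvZs_succ, List.map_append,
        List.map_cons, List.map_nil, pvZ]
      norm_num
    have h2 : (pvZs a d 21).map Prod.snd ++ [pvCountA a d (44 - 2 * 21)] = (pvZs a d 22).map Prod.snd := by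
      rw [show (22 : Nat) = 21 + 1 from rfl, pvZs_succ, List.map_append]
      rfl
    have h3 : (pvZs a d 21).map pvKey ++ [|25 - pvCountA a d (44 - 2 * 21)|] = (pvZs a d 22).map pvKey := by
      rw [show (22 : Nat) = 21 + 1 from rfl, pvZs_succ, List.map_append]
      rfl
    rw [h1, h2, h3]
    rfl
  | succ n ih =>
    intro j hj
    rw [pvOuterA]
    rw [dif_neg (show ¬ (44 - 2 * j ≤ 2) by omega)]
    have h1 : (pvZs a d j).map Prod.fst ++ [((44 - 2 * j : Nat) : Int)] = (pvZs a d (j + 1)).map Prod.fst := by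
      simp only [pvZs_succ, List.map_append, List.map_cons, List.map_nil, pvZ]
      congr 2
      omega
    have h2 : (pvZs a d j).map Prod.snd ++ [pvCountA a d (44 - 2 * j)] = (pvZs a d (j + 1)).map Prod.snd := by
      rw [pvZs_succ, List.map_append]
      rfl
    have h3 : (pvZs a d j).map pvKey ++ [|25 - pvCountA a d (44 - 2 * j)|] = (pvZs a d (j + 1)).map pvKey := by
      rw [pvZs_succ, List.map_append]
      rfl
    rw [h1, h2, h3]
    have harith : 44 - 2 * j - 2 = 44 - 2 * (j + 1) := by omega
    rw [harith]
    exact ih (j + 1) (by omega)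

-- A's selection = the first strict running minimum
theorem pvSel_eq (z0 : Int × Int) (zs : List (Int × Int)) :
    pvSel (z0 :: zs) = [(pvPick pvKey z0 zs).1, (pvPick pvKey z0 zs).2] := by
  obtain ⟨i, hidx, hget⟩ := pvPick_index pvKey zs z0
  unfold pvSel
  have hmin : (PySem.List.min? ((z0 :: zs).map pvKey) (fun x => x)).getD 0
      = pvKey (pvPick pvKey z0 zs) := by
    rw [List.map_cons, PySem.List.min?_id_cons]
    rw [pvPick_min pvKey zs z0]
    rfl
  rw [hmin, hidx]
  simp only [Option.getD_some, List.getElem?_map, hget]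
  rfl

-- the two counting folds agree (both count entries whose lcp reaches the prefix)
theorem pvCount_eq (a : List Char) (data : List String) (k : Nat) (hk : k ≤ 21) :
    (data.map (fun other => (pvLcpB a other.toList 0 : Int))).foldl
      (fun s L => if (44 : Int) - 2 * (k : Int) ≤ L then s + 1 else s) 0
    = pvCountA a (data.map String.toList) (44 - 2 * k) := by
  rw [List.foldl_map]
  unfold pvCountA
  rw [List.foldl_map]
  congr 1
  funext s o
  rw [pvLcpB_eq a o.toList 44 0 (by omega) (by omega)]
  rw [pvInnerA_eq a o.toList (44 - 2 * k) (44 - 2 * k) 0 (by omega) (by omega)]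
  simp only [List.drop_zero]
  split_ifs with h1 h2 <;> first | rfl | (exfalso; omega)

-- B's fold over k-indices is the abstract fold over the rows
theorem pvBfold_eq (a : List Char) (data : List String) :
    ∀ (ks : List Nat) (acc : Option ((Int × Int) × Int)), (∀ k ∈ ks, k ≤ 21) →
      ks.foldl (fun best (k : Nat) =>
        let p : Int := 44 - 2 * (k : Int)
        let c : Int := (data.map (fun other => (pvLcpB a other.toList 0 : Int))).foldl
          (fun s L => if p ≤ L then s + 1 else s) 0
        let d : Int := |25 - c|
        match best with
        | none => some ((p, c), d)
        | some ((bp, bc), bd) => if d < bd then some ((p, c), d) else some ((bp, bc), bd)) acc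
      = (ks.map (pvZ a (data.map String.toList))).foldl (pvStep pvKey) acc := by
  intro ks
  induction ks with
  | nil => intro acc _; rfl
  | cons k ks ih =>
    intro acc hks
    rw [List.foldl_cons, List.map_cons, List.foldl_cons]
    have hc := pvCount_eq a data k (hks k (by simp))
    have hstep : (let p : Int := 44 - 2 * (k : Int)
        let c : Int := (data.map (fun other => (pvLcpB a other.toList 0 : Int))).foldl
          (fun s L => if p ≤ L then s + 1 else s) 0
        let d : Int := |25 - c|
        match acc with
        | none => some ((p, c), d)
        | some ((bp, bc), bd) => if d < bd then some ((p, c), d) else some ((bp, bc), bd))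
        = pvStep pvKey acc (pvZ a (data.map String.toList) k) := by
      simp only [hc]
      rcases acc with _ | ⟨⟨bp, bc⟩, bd⟩ <;> rfl

    rw [hstep]
    exact ih _ (fun x hx => hks x (by simp [hx]))

-- ===== VERDICT (by name: the statement is the Claim_ definition above) =====
theorem find_prefix3_spec : Claim_equal_find_prefix3 := by
  intro cp data _ _
  unfold Spec_find_prefix3
  have hA : find_prefix3 cp data = pvSel (pvZs cp.toList (data.map String.toList) 22) := by
    unfold find_prefix3
    have := pvOuterA_run cp.toList (data.map String.toList) 21 0 (by omega)
    simpa [pvZs] using this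
  have hcons : pvZs cp.toList (data.map String.toList) 22
      = pvZ cp.toList (data.map String.toList) 0
        :: ((List.range 21).map Nat.succ).map (pvZ cp.toList (data.map String.toList)) := by
    unfold pvZs
    rw [List.range_succ_eq_map]
    rfl
  set z0 := pvZ cp.toList (data.map String.toList) 0 with hz0
  set rest := ((List.range 21).map Nat.succ).map (pvZ cp.toList (data.map String.toList)) with hrest
  have hB : find_prefix3_alt cp data = [(pvPick pvKey z0 rest).1, (pvPick pvKey z0 rest).2] := by
    show (match (List.range 22).foldl
        (fun best (k : Nat) =>
          let p : Int := 44 - 2 * (k : Int)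
          let c : Int := (data.map (fun other => (pvLcpB cp.toList other.toList 0 : Int))).foldl
            (fun s L => if p ≤ L then s + 1 else s) 0
          let d : Int := |25 - c|
          match best with
          | none => some ((p, c), d)
          | some ((bp, bc), bd) => if d < bd then some ((p, c), d) else some ((bp, bc), bd)) none with
      | some ((bp, bc), _) => [bp, bc]
      | none => [0, 0]) = [(pvPick pvKey z0 rest).1, (pvPick pvKey z0 rest).2]
    rw [pvBfold_eq cp.toList data (List.range 22) none
      (fun k hk => by simp at hk; omega)]
    have : (List.range 22).map (pvZ cp.toList (data.map String.toList)) = z0 :: rest := hcons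
    rw [this]
    rw [List.foldl_cons]
    have hfirst : pvStep pvKey (none : Option ((Int × Int) × Int)) z0 = some (z0, pvKey z0) := rfl
    rw [hfirst, pvFoldB pvKey rest z0]
  rw [hA, hB, hcons, pvSel_eq]
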